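-- pv_equiv track=rewrite | github.com/roVer-HM/crownet | crownet/simulations/vamClusterIEEEAccess/eval/study_danger_zone_correctness.py | aggregate_actual_positions_by_time
-- ===== SOURCE A (Python) =====
-- START_TIME = 0
--
-- END_TIME = 550
--
-- def aggregate_actual_positions_by_time(positions):
--     aggregated = {}
--
--     for t in range(START_TIME, END_TIME):
--         if t not in aggregated:
--             aggregated[t] = []
--
--         for mod in positions.keys():
--             if t in positions[mod]:
--                 aggregated[t].append(positions[mod][t])
--
--     return aggregated
-- ===== SOURCE B (Python) =====
-- START_TIME = 0
--
-- END_TIME = 550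
--
-- def aggregate_actual_positions_by_time(positions):
--     aggregated = {t: [] for t in range(START_TIME, END_TIME)}
--
--     for times in positions.values():
--         for t, pos in times.items():
--             if START_TIME <= t < END_TIME:
--                 aggregated[t].append(pos)
--
--     return aggregated
-- ===== Notes on version B (the rewrite author's own statement) =====
-- stated objective: faster
-- what changed: Instead of scanning every module for every one of the 550 time steps, B pre-builds all empty time buckets once and makes a single pass over each module's time-keyed entries, appending each position directly into its bucket.
import Mathlib
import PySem

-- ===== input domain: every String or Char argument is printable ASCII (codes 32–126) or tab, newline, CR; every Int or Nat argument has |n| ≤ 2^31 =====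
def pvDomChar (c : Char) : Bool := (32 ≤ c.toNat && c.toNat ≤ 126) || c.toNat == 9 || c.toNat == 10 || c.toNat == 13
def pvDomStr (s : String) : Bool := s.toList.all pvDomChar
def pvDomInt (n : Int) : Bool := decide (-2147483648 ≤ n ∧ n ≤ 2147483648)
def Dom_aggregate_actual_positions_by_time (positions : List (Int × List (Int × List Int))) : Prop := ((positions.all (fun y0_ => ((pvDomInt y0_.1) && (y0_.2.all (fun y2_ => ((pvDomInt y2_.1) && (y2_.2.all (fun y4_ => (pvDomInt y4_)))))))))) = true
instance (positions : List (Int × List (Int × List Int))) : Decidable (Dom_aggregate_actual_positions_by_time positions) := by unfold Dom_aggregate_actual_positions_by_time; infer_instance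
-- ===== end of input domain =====

-- B replaces A's scan of every module at every one of the 550 time steps by one pass over each
-- module's time-keyed entries into pre-built buckets (objective: faster, asymptotic O(T*M) → O(T+E)).

-- ===== PORT A =====
-- body of A's inner loop: 'for mod in positions.keys(): if t in positions[mod]: aggregated[t].append(positions[mod][t])'
def pvInnerA (pd : PySem.Dict Int (List (Int × List Int))) (t : Int)
    (agg : PySem.Dict Int (List (List Int))) (md : Int) : PySem.Dict Int (List (List Int)) :=
  let pm := PySem.Dict.mk (pd.getD md [])
  if pm.contains t then agg.modify t [] (fun l => l ++ [pm.getD t []]) else agg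

-- body of A's outer loop over t
def pvStepA (pd : PySem.Dict Int (List (Int × List Int)))
    (agg : PySem.Dict Int (List (List Int))) (t : Int) : PySem.Dict Int (List (List Int)) :=
  let agg := if agg.contains t then agg else agg.insert t []
  pd.keys.foldl (pvInnerA pd t) agg

def aggregate_actual_positions_by_time (positions : List (Int × List (Int × List Int))) : List (Int × List (List Int)) :=
  ((PySem.List.pyRange 0 550 1).foldl (pvStepA (PySem.Dict.mk positions)) PySem.Dict.empty).items

-- ===== PORT B =====
-- body of B's inner loop: 'if START_TIME <= t < END_TIME: aggregated[t].append(pos)'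
def pvStepB (agg : PySem.Dict Int (List (List Int))) (tp : Int × List Int) : PySem.Dict Int (List (List Int)) :=
  if 0 ≤ tp.1 ∧ tp.1 < 550 then agg.modify tp.1 [] (fun l => l ++ [tp.2]) else agg

def aggregate_actual_positions_by_time_alt (positions : List (Int × List (Int × List Int))) : List (Int × List (List Int)) :=
  (positions.foldl (fun agg md => md.2.foldl pvStepB agg)
    (PySem.Dict.ofList ((PySem.List.pyRange 0 550 1).map (fun t => (t, ([] : List (List Int))))))).items

-- ===== PRECONDITION & SPEC =====
-- Pre_ only requires the outer and the inner association lists to have pairwise-distinct keys: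
-- the Python parameter is a dict of dicts, which cannot carry duplicate keys, so no input the
-- Python function can receive is excluded.
def Pre_aggregate_actual_positions_by_time (positions : List (Int × List (Int × List Int))) : Prop :=
  (positions.map Prod.fst).Nodup ∧ ∀ p ∈ positions, (p.2.map Prod.fst).Nodup
instance (positions : List (Int × List (Int × List Int))) : Decidable (Pre_aggregate_actual_positions_by_time positions) := by
  unfold Pre_aggregate_actual_positions_by_time; infer_instance
def pvWitness_aggregate_actual_positions_by_time : (List (Int × List (Int × List Int))) :=
  [(1, [(0, [1, 2]), (600, [3])]), (2, [(0, [7])])]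
def Spec_aggregate_actual_positions_by_time (positions : List (Int × List (Int × List Int))) (out : List (Int × List (List Int))) : Prop := out = aggregate_actual_positions_by_time_alt positions
instance (positions : List (Int × List (Int × List Int))) (out : List (Int × List (List Int))) : Decidable (Spec_aggregate_actual_positions_by_time positions out) := by unfold Spec_aggregate_actual_positions_by_time; infer_instance

-- ===== CLAIM (what is proved, stated in full; the proofs are below) =====
def Claim_equal_aggregate_actual_positions_by_time : Prop := ∀ (positions : List (Int × List (Int × List Int))), Dom_aggregate_actual_positions_by_time positions → Pre_aggregate_actual_positions_by_time positions → Spec_aggregate_actual_positions_by_time positions (aggregate_actual_positions_by_time positions)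

-- ===== LEMMAS AND PROOFS =====

-- the per-time content both loops produce (A's form and B's form)
def pvContent (positions : List (Int × List (Int × List Int))) (t : Int) : List (List Int) :=
  (positions.filter (fun p => (PySem.Dict.mk p.2).contains t)).map (fun p => (PySem.Dict.mk p.2).getD t [])

theorem pv_nodup_range : (PySem.List.pyRange 0 550 1).Nodup := by
  have h : ((550 : Nat) : Int) = (550 : Int) := by norm_num
  rw [show PySem.List.pyRange 0 550 1 = PySem.List.pyRange 0 ((550 : Nat) : Int) 1 by rw [h],
    PySem.List.pyRange_zero_natCast]
  exact List.Nodup.map (fun a b h => by omega) List.nodup_range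

-- a fold of guarded appends at the single key t reads back as a map
theorem pv_modifyfold_getD {α : Type} (l : List α) (val : α → List Int) (t : Int)
    (d : PySem.Dict Int (List (List Int))) :
    (l.foldl (fun d x => d.modify t [] (fun v => v ++ [val x])) d).getD t []
      = d.getD t [] ++ l.map val := by
  induction l generalizing d with
  | nil => simp
  | cons x xs ih => simp [List.foldl_cons, ih, PySem.Dict.getD_modify_self]

theorem pv_modifyfold_keys {α : Type} (l : List α) (val : α → List Int) (t : Int)
    (d : PySem.Dict Int (List (List Int))) (h : d.contains t = true) :
    (l.foldl (fun d x => d.modify t [] (fun v => v ++ [val x])) d).keys = d.keys := by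
  induction l generalizing d with
  | nil => rfl
  | cons x xs ih =>
      rw [List.foldl_cons, ih]
      · rw [PySem.Dict.keys_modify, PySem.Dict.keys_insert_of_contains _ _ h]
      · rw [PySem.Dict.contains_modify]; simp [h]

theorem pv_modifyfold_getD_ne {α : Type} (l : List α) (val : α → List Int) (t t' : Int)
    (hne : t' ≠ t) (d : PySem.Dict Int (List (List Int))) :
    (l.foldl (fun d x => d.modify t [] (fun v => v ++ [val x])) d).getD t' []
      = d.getD t' [] := by
  induction l generalizing d with
  | nil => rfl
  | cons x xs ih => rw [List.foldl_cons, ih, PySem.Dict.getD_modify]; simp [hne]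

theorem pv_modifyfold_contains {α : Type} (l : List α) (val : α → List Int) (t t' : Int)
    (d : PySem.Dict Int (List (List Int))) (h : d.contains t = true) :
    (l.foldl (fun d x => d.modify t [] (fun v => v ++ [val x])) d).contains t'
      = d.contains t' := by
  induction l generalizing d with
  | nil => rfl
  | cons x xs ih =>
      rw [List.foldl_cons, ih]
      · rw [PySem.Dict.contains_modify]
        cases he : (t' == t)
        · simp
        · simp at he; subst he; simp [h]
      · rw [PySem.Dict.contains_modify]; simp [h]

-- A's inner loop as filter-then-map (rewritten to the unguarded modify-fold first)
theorem pv_innerA_eq (pd : PySem.Dict Int (List (Int × List Int))) (t : Int) (l : List Int)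
    (agg : PySem.Dict Int (List (List Int))) :
    l.foldl (pvInnerA pd t) agg
      = (l.filter (fun md => (PySem.Dict.mk (pd.getD md [])).contains t)).foldl
          (fun d md => d.modify t [] (fun v => v ++ [(PySem.Dict.mk (pd.getD md [])).getD t []])) agg := by
  rw [← PySem.List.foldl_if_eq_foldl_filter]
  rfl

theorem pv_stepA_getD_self (pd : PySem.Dict Int (List (Int × List Int))) (t : Int)
    (agg : PySem.Dict Int (List (List Int))) (h : agg.contains t = false) :
    (pvStepA pd agg t).getD t []
      = ((pd.keys.filter (fun md => (PySem.Dict.mk (pd.getD md [])).contains t)).map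
          (fun md => (PySem.Dict.mk (pd.getD md [])).getD t [])) := by
  unfold pvStepA
  rw [h]
  have hins : (if false = true then agg else agg.insert t ([] : List (List Int))) = agg.insert t [] := by simp
  rw [hins]
  simp only [pv_innerA_eq, pv_modifyfold_getD]
  rw [PySem.Dict.getD_insert]
  simp

theorem pv_stepA_getD_ne (pd : PySem.Dict Int (List (Int × List Int))) (t t' : Int) (hne : t' ≠ t)
    (agg : PySem.Dict Int (List (List Int))) :
    (pvStepA pd agg t).getD t' [] = agg.getD t' [] := by
  unfold pvStepA
  simp only [pv_innerA_eq, pv_modifyfold_getD_ne _ _ _ _ hne]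
  split
  · rfl
  · rw [PySem.Dict.getD_insert]; simp [hne]

theorem pv_stepA_contains (pd : PySem.Dict Int (List (Int × List Int))) (t t' : Int)
    (agg : PySem.Dict Int (List (List Int))) :
    (pvStepA pd agg t).contains t' = (t' == t || agg.contains t') := by
  unfold pvStepA
  simp only [pv_innerA_eq]
  split
  · rename_i h
    rw [pv_modifyfold_contains _ _ _ _ _ h]
    cases he : (t' == t)
    · simp
    · simp at he; subst he; simp [h]
  · rename_i h
    rw [pv_modifyfold_contains _ _ _ _ _ (PySem.Dict.contains_insert_self _ _ _),
      PySem.Dict.contains_insert]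

theorem pv_stepA_keys (pd : PySem.Dict Int (List (Int × List Int))) (t : Int)
    (agg : PySem.Dict Int (List (List Int))) (h : agg.contains t = false) :
    (pvStepA pd agg t).keys = agg.keys ++ [t] := by
  unfold pvStepA
  rw [h]
  have hins : (if false = true then agg else agg.insert t ([] : List (List Int))) = agg.insert t [] := by simp
  rw [hins]
  simp only [pv_innerA_eq]
  rw [pv_modifyfold_keys]
  · exact PySem.Dict.keys_insert_of_not_contains _ _ h
  · exact PySem.Dict.contains_insert_self _ _ _

theorem pv_foldA_keys (pd : PySem.Dict Int (List (Int × List Int))) (l : List Int)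
    (d : PySem.Dict Int (List (List Int))) (hf : ∀ t ∈ l, d.contains t = false) (hl : l.Nodup) :
    (l.foldl (pvStepA pd) d).keys = d.keys ++ l := by
  induction l generalizing d with
  | nil => simp
  | cons t xs ih =>
      rw [List.foldl_cons, ih]
      · rw [pv_stepA_keys _ _ _ (hf t (by simp))]; simp
      · intro u hu
        rw [pv_stepA_contains]
        have : u ≠ t := fun he => (List.nodup_cons.mp hl).1 (he ▸ hu)
        simp [this, hf u (by simp [hu])]
      · exact (List.nodup_cons.mp hl).2

theorem pv_foldA_getD (pd : PySem.Dict Int (List (Int × List Int))) (l : List Int)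
    (d : PySem.Dict Int (List (List Int))) (hf : ∀ t ∈ l, d.contains t = false) (hl : l.Nodup)
    (t : Int) (ht : t ∈ l) :
    (l.foldl (pvStepA pd) d).getD t []
      = ((pd.keys.filter (fun md => (PySem.Dict.mk (pd.getD md [])).contains t)).map
          (fun md => (PySem.Dict.mk (pd.getD md [])).getD t [])) := by
  induction l generalizing d with
  | nil => cases ht
  | cons u xs ih =>
      rw [List.foldl_cons]
      rcases List.mem_cons.mp ht with he | hm
      · subst he
        have hpres : ∀ (xs' : List Int) (d' : PySem.Dict Int (List (List Int))),
            (∀ v ∈ xs', v ≠ t) → (xs'.foldl (pvStepA pd) d').getD t [] = d'.getD t [] := by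
          intro xs' d' hne
          induction xs' generalizing d' with
          | nil => rfl
          | cons w ws ihw =>
              rw [List.foldl_cons, ihw _ (fun v hv => hne v (by simp [hv])),
                pv_stepA_getD_ne _ _ _ (Ne.symm (hne w (by simp)))]
        rw [hpres xs _ (fun v hv he => (List.nodup_cons.mp hl).1 (he ▸ hv)),
          pv_stepA_getD_self _ _ _ (hf t (by simp))]
      · apply ih
        · intro v hv
          rw [pv_stepA_contains]
          have : v ≠ u := fun he => (List.nodup_cons.mp hl).1 (he ▸ hv)
          simp [this, hf v (by simp [hv])]
        · exact (List.nodup_cons.mp hl).2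
        · exact hm

-- B side -------------------------------------------------------------------

theorem pv_ofList_items {ν : Type} (L : List (Int × ν)) (h : (L.map Prod.fst).Nodup) :
    (PySem.Dict.ofList L).items = L := by
  have h2 := PySem.Dict.items_foldl_insert_fresh L Prod.fst Prod.snd
    PySem.Dict.empty (by intro a _; rfl) h
  rw [show ((PySem.Dict.empty : PySem.Dict Int ν).items) = [] from rfl, List.nil_append,
    show (fun (a : Int × ν) => (a.1, a.2)) = id from rfl, List.map_id] at h2
  exact h2

theorem pv_range_fst_map :
    (((PySem.List.pyRange 0 550 1).map (fun t => (t, ([] : List (List Int))))).map Prod.fst)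
      = PySem.List.pyRange 0 550 1 := by
  rw [List.map_map, show (Prod.fst ∘ fun t : Int => (t, ([] : List (List Int)))) = id from rfl,
    List.map_id]

theorem pv_d0_items :
    (PySem.Dict.ofList ((PySem.List.pyRange 0 550 1).map (fun t => (t, ([] : List (List Int)))))).items
      = (PySem.List.pyRange 0 550 1).map (fun t => (t, ([] : List (List Int)))) :=
  pv_ofList_items _ (by rw [pv_range_fst_map]; exact pv_nodup_range)

theorem pv_stepB_keys (agg : PySem.Dict Int (List (List Int))) (tp : Int × List Int)
    (h : agg.keys = PySem.List.pyRange 0 550 1) :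
    (pvStepB agg tp).keys = PySem.List.pyRange 0 550 1 := by
  unfold pvStepB
  split
  · rename_i hg
    rw [PySem.Dict.keys_modify, PySem.Dict.keys_insert_of_contains, h]
    rw [PySem.Dict.contains_iff_mem_keys, h, PySem.List.mem_pyRange_one]
    exact hg
  · exact h

theorem pv_innerB_keys (l : List (Int × List Int)) (agg : PySem.Dict Int (List (List Int)))
    (h : agg.keys = PySem.List.pyRange 0 550 1) :
    (l.foldl pvStepB agg).keys = PySem.List.pyRange 0 550 1 := by
  induction l generalizing agg with
  | nil => exact h
  | cons x xs ih => rw [List.foldl_cons]; exact ih _ (pv_stepB_keys _ _ h)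

theorem pv_foldB_keys (ps : List (Int × List (Int × List Int))) (d : PySem.Dict Int (List (List Int)))
    (h : d.keys = PySem.List.pyRange 0 550 1) :
    (ps.foldl (fun agg md => md.2.foldl pvStepB agg) d).keys = PySem.List.pyRange 0 550 1 := by
  induction ps generalizing d with
  | nil => exact h
  | cons p ps ih => rw [List.foldl_cons]; exact ih _ (pv_innerB_keys _ _ h)

theorem pv_innerB_getD (l : List (Int × List Int)) (agg : PySem.Dict Int (List (List Int)))
    (t : Int) (ht : 0 ≤ t ∧ t < 550) :
    (l.foldl pvStepB agg).getD t []
      = agg.getD t [] ++ (l.filter (fun tp => tp.1 == t)).map (fun tp => tp.2) := by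
  unfold pvStepB
  rw [PySem.List.foldl_ite_eq_foldl_filter (fun tp => 0 ≤ tp.1 ∧ tp.1 < 550)
    (fun d tp => d.modify tp.1 [] (fun v => v ++ [tp.2])) l agg]
  rw [PySem.Dict.getD_foldl_modify_append]
  congr 1
  rw [List.filter_filter]
  congr 1
  apply List.filter_congr
  intro x _
  by_cases hx : x.1 = t
  · simp [hx, ht.1, ht.2]
  · simp [hx]

theorem pv_foldB_getD (ps : List (Int × List (Int × List Int))) (d : PySem.Dict Int (List (List Int)))
    (t : Int) (ht : 0 ≤ t ∧ t < 550) :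
    (ps.foldl (fun agg md => md.2.foldl pvStepB agg) d).getD t []
      = d.getD t [] ++ ps.flatMap (fun p => (p.2.filter (fun tp => tp.1 == t)).map (fun tp => tp.2)) := by
  induction ps generalizing d with
  | nil => simp
  | cons p ps ih =>
      rw [List.foldl_cons, ih, pv_innerB_getD _ _ _ ht]
      simp

-- content equality ----------------------------------------------------------

theorem pv_single_module (l : List (Int × List Int)) (t : Int) (h : (l.map Prod.fst).Nodup) :
    (l.filter (fun tp => tp.1 == t)).map (fun tp => tp.2)
      = (if (PySem.Dict.mk l).contains t then [(PySem.Dict.mk l).getD t []] else []) := by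
  induction l with
  | nil => simp [PySem.Dict.contains_mk]
  | cons x xs ih =>
      rw [List.map_cons] at h
      have hx := List.nodup_cons.mp h
      by_cases he : x.1 = t
      · have hxs : xs.filter (fun tp => tp.1 == t) = [] := by
          apply List.filter_eq_nil_iff.mpr
          intro a ha hc
          have : a.1 = t := by simpa using hc
          exact hx.1 (by rw [he, ← this]; exact List.mem_map_of_mem ha)
        have hc : (PySem.Dict.mk (x :: xs)).contains t = true := by
          rw [PySem.Dict.contains_mk]; simp [he]
        have hg : (PySem.Dict.mk (x :: xs)).getD t [] = x.2 := by
          rw [PySem.Dict.getD_eq_get?_getD, PySem.Dict.get?_mk_cons]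
          simp [he]
        rw [List.filter_cons, if_pos (by simp [he]), hxs, hc, hg]
        simp
      · have hc : (PySem.Dict.mk (x :: xs)).contains t = (PySem.Dict.mk xs).contains t := by
          simp [PySem.Dict.contains_mk, he]
        have hg : (PySem.Dict.mk (x :: xs)).getD t [] = (PySem.Dict.mk xs).getD t [] := by
          rw [PySem.Dict.getD_eq_get?_getD, PySem.Dict.getD_eq_get?_getD, PySem.Dict.get?_mk_cons]
          simp [he]
        rw [List.filter_cons, if_neg (by simp [he]), ih hx.2, hc, hg]

theorem pv_flatMap_if {α β : Type} (l : List α) (c : α → Bool) (g : α → β) :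
    l.flatMap (fun x => if c x then [g x] else []) = (l.filter c).map g := by
  induction l with
  | nil => rfl
  | cons x xs ih =>
      rw [List.flatMap_cons, ih, List.filter_cons]
      by_cases hc : c x = true
      · simp [hc]
      · simp [Bool.eq_false_iff.mpr hc]

theorem pv_cB_eq_content (positions : List (Int × List (Int × List Int)))
    (hin : ∀ p ∈ positions, (p.2.map Prod.fst).Nodup) (t : Int) :
    positions.flatMap (fun p => (p.2.filter (fun tp => tp.1 == t)).map (fun tp => tp.2))
      = pvContent positions t := by
  have h1 : positions.flatMap (fun p => (p.2.filter (fun tp => tp.1 == t)).map (fun tp => tp.2))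
      = positions.flatMap (fun p => if (PySem.Dict.mk p.2).contains t then [(PySem.Dict.mk p.2).getD t []] else []) := by
    induction positions with
    | nil => rfl
    | cons p ps ih =>
        rw [List.flatMap_cons, List.flatMap_cons, pv_single_module _ _ (hin p (by simp)),
          ih (fun q hq => hin q (by simp [hq]))]
  rw [h1, pv_flatMap_if]
  rfl

theorem pv_cA_eq_content (positions : List (Int × List (Int × List Int)))
    (hout : (positions.map Prod.fst).Nodup) (t : Int) :
    (((PySem.Dict.mk positions).keys.filter
        (fun md => (PySem.Dict.mk ((PySem.Dict.mk positions).getD md [])).contains t)).map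
      (fun md => (PySem.Dict.mk ((PySem.Dict.mk positions).getD md [])).getD t []))
      = pvContent positions t := by
  have hkeys : (PySem.Dict.mk positions).keys = positions.map Prod.fst := PySem.Dict.keys_mk _
  have hlook : ∀ p ∈ positions, (PySem.Dict.mk positions).getD p.1 [] = p.2 := by
    intro p hp
    exact PySem.Dict.getD_of_mem_items _ (by simpa using hp) (by simpa [hkeys] using hout) []
  rw [hkeys, List.filter_map, List.map_map]
  unfold pvContent
  have hfil : positions.filter ((fun md => (PySem.Dict.mk ((PySem.Dict.mk positions).getD md [])).contains t) ∘ Prod.fst)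
      = positions.filter (fun p => (PySem.Dict.mk p.2).contains t) := by
    apply List.filter_congr
    intro p hp
    simp [Function.comp, hlook p hp]
  rw [hfil]
  apply List.map_congr_left
  intro p hp
  simp [Function.comp, hlook p (List.mem_of_mem_filter hp)]

-- assembling both sides -----------------------------------------------------

theorem pv_A_items (positions : List (Int × List (Int × List Int)))
    (hout : (positions.map Prod.fst).Nodup) :
    aggregate_actual_positions_by_time positions
      = (PySem.List.pyRange 0 550 1).map (fun t => (t, pvContent positions t)) := by
  unfold aggregate_actual_positions_by_time
  have hkeys := pv_foldA_keys (PySem.Dict.mk positions) (PySem.List.pyRange 0 550 1)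
    PySem.Dict.empty (by intro t _; rfl) pv_nodup_range
  simp only [PySem.Dict.keys_empty, List.nil_append] at hkeys
  rw [PySem.Dict.items_eq_map_keys _ (by rw [hkeys]; exact pv_nodup_range) []]
  rw [hkeys]
  apply List.map_congr_left
  intro t ht
  rw [pv_foldA_getD (PySem.Dict.mk positions) _ PySem.Dict.empty (by intro u _; rfl)
    pv_nodup_range t ht, pv_cA_eq_content positions hout t]

theorem pv_B_items (positions : List (Int × List (Int × List Int)))
    (hin : ∀ p ∈ positions, (p.2.map Prod.fst).Nodup) :
    aggregate_actual_positions_by_time_alt positions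
      = (PySem.List.pyRange 0 550 1).map (fun t => (t, pvContent positions t)) := by
  unfold aggregate_actual_positions_by_time_alt
  have hd0keys : (PySem.Dict.ofList ((PySem.List.pyRange 0 550 1).map
      (fun t => (t, ([] : List (List Int)))))).keys = PySem.List.pyRange 0 550 1 := by
    show ((PySem.Dict.ofList _).items.map Prod.fst) = _
    rw [pv_d0_items, pv_range_fst_map]
  have hkeys := pv_foldB_keys positions _ hd0keys
  rw [PySem.Dict.items_eq_map_keys _ (by rw [hkeys]; exact pv_nodup_range) []]
  rw [hkeys]
  apply List.map_congr_left
  intro t ht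
  have htr := PySem.List.mem_pyRange_one.mp ht
  rw [pv_foldB_getD positions _ t htr]
  have hd0 : (PySem.Dict.ofList ((PySem.List.pyRange 0 550 1).map
      (fun t => (t, ([] : List (List Int)))))).getD t [] = [] := by
    apply PySem.Dict.getD_of_mem_items _ _ (by rw [hd0keys]; exact pv_nodup_range)
    show ((t : Int), ([] : List (List Int))) ∈ (PySem.Dict.ofList _).items
    rw [pv_d0_items]
    exact List.mem_map_of_mem ht
  rw [hd0, List.nil_append, pv_cB_eq_content positions hin t]

-- ===== VERDICT (by name: the statement is the Claim_ definition above) =====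
theorem aggregate_actual_positions_by_time_spec : Claim_equal_aggregate_actual_positions_by_time := by
  intro positions _ hpre
  unfold Spec_aggregate_actual_positions_by_time
  rw [pv_A_items positions hpre.1, pv_B_items positions hpre.2]
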